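-- pv_equiv track=rewrite | github.com/yijingf/Sonata-Struct-GEN | src/data_pipeline/dataset.py | validate_phrase
-- ===== SOURCE A (Python) =====
-- def validate_phrase(phrase):
--     i = 0
--     while i < len(phrase):
--         if phrase[i][0] == 'o':
--             break
--         else:
--             i += 1
--
--     j = len(phrase)
--     while j > 0:
--         if phrase[j - 1][0] == 'd':
--             break
--         elif phrase[j - 1] == 'bar':
--             break
--         elif phrase[j - 1] == 'eos':
--             break
--         else:
--             j -= 1
--     return phrase[i:j]
-- ===== SOURCE B (Python) =====
-- def validate_phrase(phrase):
--     i = len(phrase)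
--     found_o = False
--     last = -1
--     for idx, s in enumerate(phrase):
--         head = s[:1]
--         if not found_o and head == 'o':
--             i = idx
--             found_o = True
--         if head == 'd' or s == 'bar' or s == 'eos':
--             last = idx
--     return phrase[i:last + 1]
-- ===== Notes on version B (the rewrite author's own statement) =====
-- stated objective: alternative
-- what changed: Replaces A's two opposite-direction while-loops (forward scan for the first 'o'-token, backward scan for the last boundary token) with one forward fold over enumerate(phrase) that tracks both the first 'o' index and the last boundary index in a single pass.
import Mathlib
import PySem

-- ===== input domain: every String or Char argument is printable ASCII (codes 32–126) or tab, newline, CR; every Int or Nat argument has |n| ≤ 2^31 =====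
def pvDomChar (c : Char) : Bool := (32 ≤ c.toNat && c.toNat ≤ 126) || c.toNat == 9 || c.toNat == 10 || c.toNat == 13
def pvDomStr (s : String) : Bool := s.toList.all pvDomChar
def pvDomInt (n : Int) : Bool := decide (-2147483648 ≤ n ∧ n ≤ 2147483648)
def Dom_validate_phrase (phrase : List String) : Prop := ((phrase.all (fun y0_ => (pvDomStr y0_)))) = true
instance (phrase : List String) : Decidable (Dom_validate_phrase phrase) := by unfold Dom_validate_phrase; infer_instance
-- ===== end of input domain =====

-- B replaces A's two opposite-direction while-loops by ONE forward fold that tracks the first 'o'-token index and the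
-- last boundary-token index simultaneously (objective: alternative decomposition, same O(n) cost).

-- ===== PORT A =====
-- first while loop: scan forward from index i until phrase[i][0] == 'o' (none = Python IndexError on "", excluded by Pre_)
def pvAFind : List String → Nat → Nat
  | [], i => i
  | s :: rest, i =>
    match PySem.Str.pyGet? s 0 with
    | some c => if c = 'o' then i else pvAFind rest (i + 1)
    | none => i

-- second while loop: scan backward from j = len(phrase); the list argument is the reversed remaining prefix
def pvABack : List String → Nat → Nat
  | [], _ => 0
  | s :: rest, j =>
    match PySem.Str.pyGet? s 0 with
    | some c => if c = 'd' then j else if s = "bar" then j else if s = "eos" then j else pvABack rest (j - 1)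
    | none => j

def validate_phrase (phrase : List String) : List String :=
  PySem.List.slice phrase (some (pvAFind phrase 0 : Int)) (some (pvABack phrase.reverse phrase.length : Int))

-- ===== PORT B =====
def pvBStep (st : Int × Bool × Int) (p : Int × String) : Int × Bool × Int :=
  let head := PySem.Str.slice p.2 (some 0) (some 1)
  let st1 := if st.2.1 = false ∧ head = "o" then (p.1, true, st.2.2) else st
  if head = "d" ∨ p.2 = "bar" ∨ p.2 = "eos" then (st1.1, st1.2.1, p.1) else st1

def validate_phrase_alt (phrase : List String) : List String :=
  let st := (PySem.List.enumerate phrase).foldl pvBStep ((phrase.length : Int), false, -1)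
  PySem.List.slice phrase (some st.1) (some (st.2.2 + 1))

-- ===== PRECONDITION & SPEC =====
def pvIsO (s : String) : Bool := PySem.Str.pyGet? s 0 == some 'o'
def pvIsBnd (s : String) : Bool := PySem.Str.pyGet? s 0 == some 'd' || s == "bar" || s == "eos"

-- Pre_ excludes exactly the inputs on which A raises IndexError ( ''[0] ): an empty-string token strictly before the
-- first 'o'-initial token, or strictly after the last boundary token ('d'-initial, 'bar' or 'eos').
def Pre_validate_phrase (phrase : List String) : Prop :=
  "" ∉ phrase.takeWhile (fun s => !pvIsO s) ∧ "" ∉ phrase.reverse.takeWhile (fun s => !pvIsBnd s)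
instance (phrase : List String) : Decidable (Pre_validate_phrase phrase) := by unfold Pre_validate_phrase; infer_instance

def pvWitness_validate_phrase : List String := ["o1", "", "d1"]

def Spec_validate_phrase (phrase : List String) (out : List String) : Prop := out = validate_phrase_alt phrase
instance (phrase : List String) (out : List String) : Decidable (Spec_validate_phrase phrase out) := by unfold Spec_validate_phrase; infer_instance

-- ===== CLAIM (what is proved, stated in full; the proofs are below) =====
def Claim_equal_validate_phrase : Prop := ∀ (phrase : List String), Dom_validate_phrase phrase → Pre_validate_phrase phrase → Spec_validate_phrase phrase (validate_phrase phrase)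

-- ===== LEMMAS AND PROOFS =====

theorem pvPyGet0 (s : String) : PySem.Str.pyGet? s 0 = s.toList[0]? := by
  simp [pysem]

theorem pvHeadSlice (s : String) (c : Char) :
    (PySem.Str.slice s (some 0) (some 1)).toList = [c] ↔ PySem.Str.pyGet? s 0 = some c := by
  rw [PySem.Str.toList_slice, pvPyGet0]
  cases s.toList with
  | nil => simp [pysem]
  | cons a t => simp [pysem, PySem.List.slice_to]

theorem pvNeNil (s : String) (h : s ≠ "") : s.toList ≠ [] := by
  intro hn
  exact h (String.ext_iff.mpr (by simp [hn]))

theorem pvIsO_iff (s : String) : pvIsO s = true ↔ PySem.Str.pyGet? s 0 = some 'o' := by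
  simp [pvIsO]

theorem pvIsBnd_iff (s : String) :
    pvIsBnd s = true ↔ (PySem.Str.pyGet? s 0 = some 'd' ∨ s = "bar" ∨ s = "eos") := by
  simp [pvIsBnd, or_assoc]

theorem pvSomeHead (s : String) (hs : s ≠ "") : ∃ c, PySem.Str.pyGet? s 0 = some c := by
  rw [pvPyGet0]
  cases hts : s.toList with
  | nil => exact absurd hts (pvNeNil s hs)
  | cons a t => exact ⟨a, by simp⟩

theorem pvAFind_spec : ∀ (l : List String) (i : Nat),
    "" ∉ l.takeWhile (fun s => !pvIsO s) →
    pvAFind l i = i + (l.takeWhile (fun s => !pvIsO s)).length := by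
  intro l
  induction l with
  | nil => intro i _; simp [pvAFind]
  | cons s rest ih =>
    intro i hmem
    by_cases ho : pvIsO s
    · have hg := (pvIsO_iff s).mp ho
      simp only [pvAFind]
      rw [hg]
      simp [ho]
    · have htw : (s :: rest).takeWhile (fun s => !pvIsO s)
          = s :: rest.takeWhile (fun s => !pvIsO s) := by
        simp [List.takeWhile_cons, ho]
      rw [htw] at hmem
      have hs : s ≠ "" := fun h => hmem (by simp [h])
      have hrest : "" ∉ rest.takeWhile (fun s => !pvIsO s) := fun h => hmem (by simp [h])
      obtain ⟨c, hc⟩ := pvSomeHead s hs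
      have hco : c ≠ 'o' := fun h => ho ((pvIsO_iff s).mpr (h ▸ hc))
      simp only [pvAFind]
      rw [hc]
      simp only [if_neg hco, htw]
      rw [ih (i + 1) hrest]
      simp; omega

theorem pvABack_spec : ∀ (r : List String),
    "" ∉ r.takeWhile (fun s => !pvIsBnd s) →
    pvABack r r.length = r.length - (r.takeWhile (fun s => !pvIsBnd s)).length := by
  intro r
  induction r with
  | nil => intro _; simp [pvABack]
  | cons s rest ih =>
    intro hmem
    by_cases hb : pvIsBnd s
    · have htw : (s :: rest).takeWhile (fun s => !pvIsBnd s) = [] := by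
        simp [List.takeWhile_cons, hb]
      rw [htw]
      rcases (pvIsBnd_iff s).mp hb with hd | h1 | h2
      · simp only [pvABack]
        rw [hd]
        simp
      · subst h1
        have hg : PySem.Str.pyGet? "bar" 0 = some 'b' := by decide
        simp only [pvABack]
        rw [hg]
        simp
      · subst h2
        have hg : PySem.Str.pyGet? "eos" 0 = some 'e' := by decide
        simp only [pvABack]
        rw [hg]
        simp
    · have htw : (s :: rest).takeWhile (fun s => !pvIsBnd s)
          = s :: rest.takeWhile (fun s => !pvIsBnd s) := by
        simp [List.takeWhile_cons, hb]
      rw [htw] at hmem ⊢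
      have hs : s ≠ "" := fun h => hmem (by simp [h])
      have hrest : "" ∉ rest.takeWhile (fun s => !pvIsBnd s) := fun h => hmem (by simp [h])
      obtain ⟨c, hc⟩ := pvSomeHead s hs
      have hcd : c ≠ 'd' := fun h => hb ((pvIsBnd_iff s).mpr (Or.inl (h ▸ hc)))
      have hsb : s ≠ "bar" := fun h => hb ((pvIsBnd_iff s).mpr (Or.inr (Or.inl h)))
      have hse : s ≠ "eos" := fun h => hb ((pvIsBnd_iff s).mpr (Or.inr (Or.inr h)))
      have hle := (List.takeWhile_prefix (l := rest) (fun s => !pvIsBnd s)).length_le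
      simp only [pvABack]
      rw [hc]
      simp only [if_neg hcd, if_neg hsb, if_neg hse]
      have h1 : rest.length + 1 - 1 = rest.length := by omega
      rw [List.length_cons, h1, ih hrest]
      simp

theorem pvEnum_nil (n : Int) : PySem.List.enumerate ([] : List String) n = [] := rfl
theorem pvEnum_cons (x : String) (t : List String) (n : Int) :
    PySem.List.enumerate (x :: t) n = (n, x) :: PySem.List.enumerate t (n + 1) := rfl

theorem pvEnum_snoc : ∀ (l : List String) (x : String) (n : Int),
    PySem.List.enumerate (l ++ [x]) n = PySem.List.enumerate l n ++ [((n + l.length : Int), x)] := by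
  intro l
  induction l with
  | nil => intro x n; simp [pvEnum_nil, pvEnum_cons]
  | cons y t ih =>
    intro x n
    rw [List.cons_append, pvEnum_cons, pvEnum_cons, ih x (n + 1)]
    simp; ring_nf

theorem pvTakeWhile_full {l : List String} {p : String → Bool}
    (h : (l.takeWhile p).length = l.length) : l.takeWhile p = l :=
  (List.takeWhile_prefix p).eq_of_length h

theorem pvAny_takeWhile_lt {l : List String} {p : String → Bool}
    (h : l.any p = true) : (l.takeWhile (fun s => !p s)).length ≠ l.length := by
  intro hlen
  have heq := pvTakeWhile_full hlen
  obtain ⟨x, hx, hpx⟩ := List.any_eq_true.mp h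
  have := List.mem_takeWhile_imp (l := l) (p := fun s => !p s) (heq ▸ hx)
  simp [hpx] at this

theorem pvNotAny_takeWhile {l : List String} {p : String → Bool}
    (h : l.any p = false) : l.takeWhile (fun s => !p s) = l := by
  rw [List.takeWhile_eq_self_iff]
  intro x hx
  simp [List.any_eq_false.mp h x hx]

theorem pvHeadO (x : String) :
    (PySem.Str.slice x (some 0) (some 1) = "o") ↔ pvIsO x = true := by
  rw [String.ext_iff, show "o".toList = ['o'] from rfl, pvHeadSlice]
  simp [pvIsO]

theorem pvBndCond (x : String) :
    (PySem.Str.slice x (some 0) (some 1) = "d" ∨ x = "bar" ∨ x = "eos") ↔ pvIsBnd x = true := by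
  rw [String.ext_iff, show "d".toList = ['d'] from rfl, pvHeadSlice]
  simp [pvIsBnd, Bool.or_assoc]

theorem pvFold_spec (N : Int) : ∀ (l : List String),
    (PySem.List.enumerate l).foldl pvBStep (N, false, -1)
      = ((if l.any pvIsO then ((l.takeWhile (fun s => !pvIsO s)).length : Int) else N),
         l.any pvIsO,
         (l.length : Int) - ((l.reverse.takeWhile (fun s => !pvIsBnd s)).length : Int) - 1) := by
  intro l
  induction l using List.reverseRecOn with
  | nil => simp [pvEnum_nil]
  | append_singleton l x ih =>
    rw [pvEnum_snoc l x 0, List.foldl_append, ih]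
    simp only [List.foldl_cons, List.foldl_nil, zero_add]
    have hrev : (l ++ [x]).reverse = x :: l.reverse := by simp
    by_cases hbx : pvIsBnd x
    · have hcond : (PySem.Str.slice x (some 0) (some 1) = "d" ∨ x = "bar" ∨ x = "eos") :=
        (pvBndCond x).mpr hbx
      by_cases hfo : l.any pvIsO
      · -- found already true: i unchanged
        have hno : ¬ (l.any pvIsO = false ∧ PySem.Str.slice x (some 0) (some 1) = "o") := by
          simp [hfo]
        simp only [pvBStep, hfo, if_pos hcond, if_neg hno]
        have htw : (l ++ [x]).takeWhile (fun s => !pvIsO s) = l.takeWhile (fun s => !pvIsO s) := by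
          rw [List.takeWhile_append, if_neg (pvAny_takeWhile_lt hfo)]
        simp [htw, hrev, List.takeWhile_cons, hbx, hfo]
      · have htwl : l.takeWhile (fun s => !pvIsO s) = l := pvNotAny_takeWhile (by simpa using hfo)
        by_cases hox : pvIsO x
        · have hcondo : (l.any pvIsO = false ∧ PySem.Str.slice x (some 0) (some 1) = "o") :=
            ⟨by simpa using hfo, (pvHeadO x).mpr hox⟩
          simp only [pvBStep, if_pos hcondo, if_pos hcond]
          have htw : (l ++ [x]).takeWhile (fun s => !pvIsO s) = l := by
            rw [List.takeWhile_append, if_pos (by rw [htwl])]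
            simp [List.takeWhile_cons, hox]
          simp [htw, hrev, List.takeWhile_cons, hbx, hfo, hox]
        · have hno : ¬ (l.any pvIsO = false ∧ PySem.Str.slice x (some 0) (some 1) = "o") := by
            intro h
            exact hox ((pvHeadO x).mp h.2)
          simp only [pvBStep, if_neg hno, if_pos hcond]
          simp [hrev, List.takeWhile_cons, hbx, hfo, hox]
    · have hcond : ¬ (PySem.Str.slice x (some 0) (some 1) = "d" ∨ x = "bar" ∨ x = "eos") := by
        intro h
        exact hbx ((pvBndCond x).mp h)
      have htwb : (x :: l.reverse).takeWhile (fun s => !pvIsBnd s)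
          = x :: l.reverse.takeWhile (fun s => !pvIsBnd s) := by
        simp [List.takeWhile_cons, hbx]
      have hlen := (List.takeWhile_prefix (l := l.reverse) (fun s => !pvIsBnd s)).length_le
      rw [List.length_reverse] at hlen
      by_cases hfo : l.any pvIsO
      · have hno : ¬ (l.any pvIsO = false ∧ PySem.Str.slice x (some 0) (some 1) = "o") := by
          simp [hfo]
        simp only [pvBStep, if_neg hno, if_neg hcond]
        have htw : (l ++ [x]).takeWhile (fun s => !pvIsO s) = l.takeWhile (fun s => !pvIsO s) := by
          rw [List.takeWhile_append, if_neg (pvAny_takeWhile_lt hfo)]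
        simp [htw, hrev, htwb, hfo]
      · have htwl : l.takeWhile (fun s => !pvIsO s) = l := pvNotAny_takeWhile (by simpa using hfo)
        by_cases hox : pvIsO x
        · have hcondo : (l.any pvIsO = false ∧ PySem.Str.slice x (some 0) (some 1) = "o") :=
            ⟨by simpa using hfo, (pvHeadO x).mpr hox⟩
          simp only [pvBStep, if_pos hcondo, if_neg hcond]
          have htw : (l ++ [x]).takeWhile (fun s => !pvIsO s) = l := by
            rw [List.takeWhile_append, if_pos (by rw [htwl])]
            simp [List.takeWhile_cons, hox]
          simp [htw, hrev, htwb, hfo, hox]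
        · have hno : ¬ (l.any pvIsO = false ∧ PySem.Str.slice x (some 0) (some 1) = "o") := by
            intro h
            exact hox ((pvHeadO x).mp h.2)
          simp only [pvBStep, if_neg hno, if_neg hcond]
          simp [hrev, htwb, hfo, hox]

-- ===== VERDICT (by name: the statement is the Claim_ definition above) =====
theorem validate_phrase_spec : Claim_equal_validate_phrase := by
  intro phrase _ hpre
  obtain ⟨h1, h2⟩ := hpre
  unfold Spec_validate_phrase validate_phrase validate_phrase_alt
  rw [pvFold_spec]
  have hA1 : pvAFind phrase 0 = (phrase.takeWhile (fun s => !pvIsO s)).length := by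
    rw [pvAFind_spec phrase 0 h1]; omega
  have hA2 : pvABack phrase.reverse phrase.length
      = phrase.length - (phrase.reverse.takeWhile (fun s => !pvIsBnd s)).length := by
    have := pvABack_spec phrase.reverse (by simpa using h2)
    simpa using this
  have hlen := (List.takeWhile_prefix (l := phrase.reverse) (fun s => !pvIsBnd s)).length_le
  rw [List.length_reverse] at hlen
  have hi : ((pvAFind phrase 0 : Nat) : Int)
      = (if phrase.any pvIsO then ((phrase.takeWhile (fun s => !pvIsO s)).length : Int)
         else (phrase.length : Int)) := by
    by_cases hfo : phrase.any pvIsO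
    · simp [hA1, hfo]
    · rw [if_neg hfo, hA1, pvNotAny_takeWhile (by simpa using hfo)]
  have hj : ((pvABack phrase.reverse phrase.length : Nat) : Int)
      = (phrase.length : Int) - ((phrase.reverse.takeWhile (fun s => !pvIsBnd s)).length : Int) - 1 + 1 := by
    rw [hA2]; omega
  show PySem.List.slice phrase (some ((pvAFind phrase 0 : Nat) : Int))
      (some ((pvABack phrase.reverse phrase.length : Nat) : Int))
    = PySem.List.slice phrase
        (some (if phrase.any pvIsO then ((phrase.takeWhile (fun s => !pvIsO s)).length : Int)
               else (phrase.length : Int)))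
        (some ((phrase.length : Int) - ((phrase.reverse.takeWhile (fun s => !pvIsBnd s)).length : Int) - 1 + 1))
  rw [hi, hj]
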